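-- pv_equiv track=rewrite | github.com/nermadie/CodeForces_Solutions | CodeforcesRound960Div2/prob01.py | solve
-- ===== SOURCE A (Python) =====
-- def solve(n, a):
--     dict_a = {}
--     for item in a:
--         dict_a.setdefault(item, 0)
--         dict_a[item] += 1
--     list_dict_a = list(dict_a.items())
--     list_dict_a.sort(key=lambda x: x[0], reverse=True)
--     for i in range(len(list_dict_a)):
--         if list_dict_a[i][1] % 2 == 1:
--             return "YES"
--     return "NO"
-- ===== SOURCE B (Python) =====
-- def solve(n, a):
--     # Parity-toggle set: after the loop, `odd` holds exactly the values
--     # that occurred an odd number of times.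
--     odd = set()
--     for x in a:
--         if x in odd:
--             odd.remove(x)
--         else:
--             odd.add(x)
--     return "YES" if odd else "NO"
-- ===== Notes on version B (the rewrite author's own statement) =====
-- stated objective: faster
-- what changed: Replaces A's dict counting plus a descending sort of the items and a scan for an odd count by a single pass that toggles each value in a set, answering YES iff the set is nonempty at the end.
import Mathlib
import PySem

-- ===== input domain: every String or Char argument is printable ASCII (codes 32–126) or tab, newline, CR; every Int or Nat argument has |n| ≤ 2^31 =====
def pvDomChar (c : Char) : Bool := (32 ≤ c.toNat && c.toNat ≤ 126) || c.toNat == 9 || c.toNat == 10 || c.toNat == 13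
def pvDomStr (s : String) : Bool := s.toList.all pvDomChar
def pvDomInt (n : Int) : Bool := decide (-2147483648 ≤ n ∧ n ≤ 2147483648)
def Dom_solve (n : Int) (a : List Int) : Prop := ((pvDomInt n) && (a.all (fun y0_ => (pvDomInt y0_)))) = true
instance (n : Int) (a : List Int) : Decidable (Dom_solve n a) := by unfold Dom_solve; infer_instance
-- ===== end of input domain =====

-- B replaces A's dict-count + descending sort + odd-count scan by a single pass
-- toggling each value in a set (YES iff the set is nonempty at the end).

-- ===== PORT A =====
def solve (n : Int) (a : List Int) : String :=
  let dict_a := a.foldl (fun d item =>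
      let d' := d.setdefault item 0          -- dict_a.setdefault(item, 0)
      d'.insert item (d'.getD item 0 + 1))   -- dict_a[item] += 1 (key present after setdefault)
    PySem.Dict.empty
  let list_dict_a := PySem.List.sorted dict_a.items (fun x => x.1) true
  -- the for-range loop returning "YES" at the first odd count
  if list_dict_a.any (fun p => PySem.Int.mod p.2 2 == 1) then "YES" else "NO"

-- ===== PORT B =====
def solve_alt (n : Int) (a : List Int) : String :=
  let odd := a.foldl (fun s x =>
      if PySem.Set.contains s x then (PySem.Set.remove? s x).getD s  -- x ∈ odd, so remove never raises
      else PySem.Set.add s x)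
    PySem.Set.empty
  if odd.isEmpty then "NO" else "YES"

-- ===== PRECONDITION & SPEC =====
def Spec_solve (n : Int) (a : List Int) (out : String) : Prop := out = solve_alt n a
instance (n : Int) (a : List Int) (out : String) : Decidable (Spec_solve n a out) := by unfold Spec_solve; infer_instance

-- ===== CLAIM (what is proved, stated in full; the proofs are below) =====
def Claim_equal_solve : Prop := ∀ (n : Int) (a : List Int), Dom_solve n a → Spec_solve n a (solve n a)

-- ===== LEMMAS AND PROOFS =====

-- A's loop body equals the standard counter step
theorem counter_step_eq (d : PySem.Dict Int Int) (k : Int) :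
    (d.setdefault k 0).insert k ((d.setdefault k 0).getD k 0 + 1)
      = d.insert k (d.getD k 0 + 1) := by
  rw [PySem.Dict.getD_setdefault_self]
  by_cases h : d.contains k = true
  · rw [PySem.Dict.setdefault_of_contains _ _ h]
  · rw [PySem.Dict.setdefault_of_not_contains _ _ (by simpa using h),
        PySem.Dict.insert_insert_self]

theorem dictA_eq_counter (a : List Int) :
    a.foldl (fun d item =>
      let d' := d.setdefault item 0
      d'.insert item (d'.getD item 0 + 1)) PySem.Dict.empty
    = PySem.Dict.counter a := by
  rw [← PySem.Dict.foldl_insert_getD_add_one_eq_counter]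
  congr 1
  funext d k
  exact counter_step_eq d k

theorem intmod_two (m : Nat) :
    (PySem.Int.mod (m : Int) 2 == 1) = decide (m % 2 = 1) := by
  have h : PySem.Int.mod (m : Int) 2 = ((m % 2 : Nat) : Int) := by
    simp [PySem.Int.mod, Int.fmod_eq_emod]
  rw [h]
  rcases Nat.mod_two_eq_zero_or_one m with h2 | h2 <;> simp [h2]

-- A returns "YES" iff some value occurs an odd number of times
theorem solve_char (n : Int) (a : List Int) :
    solve n a = if ∃ x ∈ a, List.count x a % 2 = 1 then "YES" else "NO" := by
  unfold solve
  simp only [dictA_eq_counter]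
  have hany : (PySem.List.sorted (PySem.Dict.counter a).items (fun x => x.1) true).any
      (fun p => PySem.Int.mod p.2 2 == 1) = true ↔ ∃ x ∈ a, List.count x a % 2 = 1 := by
    rw [List.any_eq_true]
    constructor
    · rintro ⟨p, hp, hf⟩
      rw [PySem.List.mem_sorted, PySem.Dict.items_counter, List.mem_map] at hp
      obtain ⟨k, hk, rfl⟩ := hp
      rw [intmod_two, decide_eq_true_eq] at hf
      exact ⟨k, (PySem.Set.mem_ofList a k).mp hk, hf⟩
    · rintro ⟨x, hxa, hx⟩
      refine ⟨(x, ((List.count x a : Nat) : Int)), ?_, ?_⟩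
      · rw [PySem.List.mem_sorted, PySem.Dict.items_counter, List.mem_map]
        exact ⟨x, (PySem.Set.mem_ofList a x).mpr hxa, rfl⟩
      · rw [intmod_two, decide_eq_true_eq]
        exact hx
  by_cases h : ∃ x ∈ a, List.count x a % 2 = 1
  · rw [if_pos h, if_pos (hany.mpr h)]
  · rw [if_neg h, if_neg (fun hc => h (hany.mp hc))]

-- membership after one toggle step
theorem mem_toggle_step (s : PySem.Set Int) (y x : Int) :
    (x ∈ if PySem.Set.contains s y then (PySem.Set.remove? s y).getD s
         else PySem.Set.add s y)
    ↔ (if x = y then y ∉ s else x ∈ s) := by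
  by_cases hy : y ∈ s
  · rw [if_pos ((PySem.Set.contains_iff s y).mpr hy), PySem.Set.remove?_of_mem hy]
    simp only [Option.getD_some, PySem.Set.mem_discard]
    by_cases hxy : x = y <;> simp [hxy, hy]
  · rw [if_neg (by simpa using (fun h => hy ((PySem.Set.contains_iff s y).mp h))),
        PySem.Set.mem_add]
    by_cases hxy : x = y <;> simp [hxy, hy]

-- loop invariant: the toggle set holds exactly the values with odd count so far
theorem mem_toggle (l : List Int) : ∀ (s : PySem.Set Int) (x : Int),
    (x ∈ l.foldl (fun s x =>
        if PySem.Set.contains s x then (PySem.Set.remove? s x).getD s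
        else PySem.Set.add s x) s)
    ↔ ((x ∈ s) ↔ List.count x l % 2 = 0) := by
  induction l with
  | nil => intro s x; simp
  | cons y t ih =>
    intro s x
    rw [List.foldl_cons, ih, mem_toggle_step, List.count_cons]
    by_cases hxy : x = y
    · subst hxy
      simp only [BEq.rfl, if_true]
      by_cases hs : x ∈ s <;> simp [hs] <;> omega
    · have hyx : ¬ y = x := fun h => hxy h.symm
      simp [if_neg hxy, hyx]

theorem solve_alt_char (n : Int) (a : List Int) :
    solve_alt n a = if ∃ x ∈ a, List.count x a % 2 = 1 then "YES" else "NO" := by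
  unfold solve_alt
  have hodd : ∀ x : Int, (x ∈ a.foldl (fun s x =>
      if PySem.Set.contains s x then (PySem.Set.remove? s x).getD s
      else PySem.Set.add s x) PySem.Set.empty) ↔ List.count x a % 2 = 1 := by
    intro x
    rw [mem_toggle]
    have hemp : ¬ (x ∈ PySem.Set.empty) := by simp [PySem.Set.empty]
    constructor
    · intro h
      by_contra hc
      exact hemp (h.mpr (by omega))
    · intro h
      exact ⟨fun hs => absurd hs hemp, fun hc => by omega⟩
  by_cases h : ∃ x ∈ a, List.count x a % 2 = 1
  · rw [if_pos h]
    obtain ⟨x, _, hx⟩ := h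
    have hmem := (hodd x).mpr hx
    rw [if_neg]
    intro he
    rw [List.isEmpty_iff] at he
    rw [he] at hmem
    exact absurd hmem List.not_mem_nil
  · rw [if_neg h, if_pos]
    rw [List.isEmpty_iff, List.eq_nil_iff_forall_not_mem]
    intro x hx
    have hc := (hodd x).mp hx
    have hxa : x ∈ a := by
      rcases Nat.eq_zero_or_pos (List.count x a) with h0 | h0
      · omega
      · exact List.count_pos_iff.mp h0
    exact h ⟨x, hxa, hc⟩

-- ===== VERDICT (by name: the statement is the Claim_ definition above) =====
theorem solve_spec : Claim_equal_solve := by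
  intro n a _
  unfold Spec_solve
  rw [solve_char, solve_alt_char]
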